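-- pv_equiv track=rewrite | github.com/aodn/data-discovery-ai | data_discovery_ai/agents/descriptionFormattingAgent.py | extract_last_sentence
-- ===== SOURCE A (Python) =====
-- def extract_last_sentence(text: str) -> str:
--     """
--     Extract the last sentence from formatted text for context.
--     Input: text: Formatted text
--
--     Output: Last sentence of the text or last 100 characters if no sentence boundary found
--     """
--     if not text or not text.strip():
--         return ""
--
--     text = text.strip()
--     sentence_endings = [". ", "! ", "? ", ".\n", "!\n", "?\n"]
--
--     last_boundary = -1
--     for ending in sentence_endings:
--         pos = text.rfind(ending)
--         if pos > last_boundary: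
--             last_boundary = pos
--
--     if last_boundary != -1:
--         return text[last_boundary + 2 :].strip()
--     else:
--         return text[-100:].strip() if len(text) > 100 else text
-- ===== SOURCE B (Python) =====
-- def extract_last_sentence(text: str) -> str:
--     if not text or not text.strip():
--         return ""
--     text = text.strip()
--     i = len(text) - 2
--     while i >= 0:
--         if text[i] in ".!?" and text[i + 1] in " \n":
--             return text[i + 2:].strip()
--         i -= 1
--     return text[-100:].strip() if len(text) > 100 else text
-- ===== Notes on version B (the rewrite author's own statement) =====
-- stated objective: simpler
-- what changed: Replaces the six separate rfind scans (one per two-character sentence ending) and the running maximum with a single reverse scan over the characters that stops at the rightmost sentence-ending punctuation mark followed by a space or newline.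
import Mathlib
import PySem

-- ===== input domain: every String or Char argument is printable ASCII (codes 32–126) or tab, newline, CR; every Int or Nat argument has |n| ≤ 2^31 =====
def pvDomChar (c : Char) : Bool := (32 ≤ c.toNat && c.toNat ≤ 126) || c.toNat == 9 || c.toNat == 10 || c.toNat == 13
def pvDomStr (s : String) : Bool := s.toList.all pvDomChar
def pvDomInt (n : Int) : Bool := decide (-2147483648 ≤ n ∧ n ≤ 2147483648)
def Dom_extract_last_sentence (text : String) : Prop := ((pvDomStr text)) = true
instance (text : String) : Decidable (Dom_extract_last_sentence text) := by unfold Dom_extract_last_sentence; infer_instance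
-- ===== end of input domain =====

-- B replaces A's six rfind scans with one reverse scan for the rightmost sentence boundary (simpler, one pass).

-- ===== PORT A =====
def extract_last_sentence (text : String) : String :=
  if text = "" || PySem.Str.strip text = "" then ""
  else
    let t := PySem.Str.strip text
    let sentence_endings : List String := [". ", "! ", "? ", ".\n", "!\n", "?\n"]
    let last_boundary : Int := sentence_endings.foldl
      (fun lb e =>
        let pos := PySem.Str.rfind t e
        if pos > lb then pos else lb) (-1)
    if last_boundary ≠ -1 then
      PySem.Str.strip (PySem.Str.slice t (some (last_boundary + 2)) none)
    else
      if PySem.Str.len t > 100 then PySem.Str.strip (PySem.Str.slice t (some (-100)) none) else t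

-- ===== PORT B =====
-- the loop body's membership test: sentence-ending punctuation followed by space or newline
def pvBdry (cs : List Char) (i : Nat) : Bool :=
  (cs[i]? == some '.' || cs[i]? == some '!' || cs[i]? == some '?') &&
  (cs[i+1]? == some ' ' || cs[i+1]? == some '\n')

-- the while loop: checks indices k-1, k-2, …, 0 and returns the first (= rightmost) boundary
def pvRevScan (cs : List Char) : Nat → Option Nat
  | 0 => none
  | k+1 => if pvBdry cs k then some k else pvRevScan cs k

def extract_last_sentence_alt (text : String) : String :=
  if text = "" || PySem.Str.strip text = "" then ""
  else
    let t := PySem.Str.strip text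
    match pvRevScan t.toList (t.toList.length - 1) with
    | some i => PySem.Str.strip (PySem.Str.slice t (some ((i : Int) + 2)) none)
    | none =>
      if PySem.Str.len t > 100 then PySem.Str.strip (PySem.Str.slice t (some (-100)) none) else t

-- ===== PRECONDITION & SPEC =====
def Spec_extract_last_sentence (text : String) (out : String) : Prop := out = extract_last_sentence_alt text
instance (text : String) (out : String) : Decidable (Spec_extract_last_sentence text out) := by unfold Spec_extract_last_sentence; infer_instance

-- ===== CLAIM (what is proved, stated in full; the proofs are below) =====
def Claim_equal_extract_last_sentence : Prop := ∀ (text : String), Dom_extract_last_sentence text → Spec_extract_last_sentence text (extract_last_sentence text)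

-- ===== LEMMAS AND PROOFS =====

-- A's running maximum of the six rfinds, expressed on char lists with search bound k
def pvM (cs : List Char) (k : Nat) : Int :=
  [['.',' '], ['!',' '], ['?',' '], ['.','\n'], ['!','\n'], ['?','\n']].foldl
    (fun lb e =>
      let pos := PySem.Chars.rfind.go cs e k
      if pos > lb then pos else lb) (-1)

def pvScanInt (cs : List Char) (m : Nat) : Int :=
  match pvRevScan cs m with
  | some i => (i : Int)
  | none => -1

lemma pvPrefix2 (c1 c2 : Char) (l : List Char) :
    ([c1, c2].isPrefixOf l) = ((l[0]? == some c1) && (l[1]? == some c2)) := by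
  match l with
  | [] => rfl
  | [a] => simp [List.isPrefixOf]
  | a :: b :: rest =>
    simp only [List.isPrefixOf, List.getElem?_cons_zero, List.getElem?_cons_succ]
    rw [Bool.eq_iff_iff]
    simp only [Bool.and_eq_true, beq_iff_eq, Option.some.injEq]
    aesop

lemma pvPrefix2_drop (c1 c2 : Char) (cs : List Char) (i : Nat) :
    ([c1, c2].isPrefixOf (cs.drop i)) = ((cs[i]? == some c1) && (cs[i+1]? == some c2)) := by
  rw [pvPrefix2]
  simp [List.getElem?_drop]

lemma pvBdry_eq (cs : List Char) (i : Nat) :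
    pvBdry cs i =
      (([ '.', ' '].isPrefixOf (cs.drop i)) || (['!', ' '].isPrefixOf (cs.drop i)) ||
       (['?', ' '].isPrefixOf (cs.drop i)) || (['.', '\n'].isPrefixOf (cs.drop i)) ||
       (['!', '\n'].isPrefixOf (cs.drop i)) || (['?', '\n'].isPrefixOf (cs.drop i))) := by
  simp only [pvPrefix2_drop, pvBdry]
  cases h1 : (cs[i]? == some '.') <;> cases h2 : (cs[i]? == some '!') <;>
    cases h3 : (cs[i]? == some '?') <;> cases h4 : (cs[i+1]? == some ' ') <;>
    cases h5 : (cs[i+1]? == some '\n') <;> rfl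

lemma pvGo_le (cs sub : List Char) : ∀ k : Nat, PySem.Chars.rfind.go cs sub k ≤ (k : Int) := by
  intro k
  induction k with
  | zero =>
    show (if sub.isPrefixOf cs then (0 : Int) else -1) ≤ 0
    split_ifs <;> omega
  | succ k ih =>
    show (if sub.isPrefixOf (cs.drop (k+1)) then ((k+1 : Nat) : Int) else PySem.Chars.rfind.go cs sub k) ≤ _
    split_ifs <;> push_cast <;> omega

lemma pvIfMax (l p : Int) : (if p > l then p else l) = max l p := by
  rw [max_def]; split_ifs <;> omega

lemma pvM_max (cs : List Char) (k : Nat) : pvM cs k =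
    max (max (max (max (max (max (-1)
      (PySem.Chars.rfind.go cs ['.',' '] k)) (PySem.Chars.rfind.go cs ['!',' '] k))
      (PySem.Chars.rfind.go cs ['?',' '] k)) (PySem.Chars.rfind.go cs ['.','\n'] k))
      (PySem.Chars.rfind.go cs ['!','\n'] k)) (PySem.Chars.rfind.go cs ['?','\n'] k) := by
  simp only [pvM, List.foldl, pvIfMax]

set_option maxHeartbeats 2000000 in
lemma pvMaxStep (k g1 g2 g3 g4 g5 g6 : Int) (b1 b2 b3 b4 b5 b6 : Bool) (hk : -1 ≤ k)
    (h1 : g1 ≤ k) (h2 : g2 ≤ k) (h3 : g3 ≤ k) (h4 : g4 ≤ k) (h5 : g5 ≤ k) (h6 : g6 ≤ k) :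
    max (max (max (max (max (max (-1) (if b1 = true then k+1 else g1)) (if b2 = true then k+1 else g2))
      (if b3 = true then k+1 else g3)) (if b4 = true then k+1 else g4)) (if b5 = true then k+1 else g5))
      (if b6 = true then k+1 else g6)
    = if b1 = true ∨ b2 = true ∨ b3 = true ∨ b4 = true ∨ b5 = true ∨ b6 = true then k+1
      else max (max (max (max (max (max (-1) g1) g2) g3) g4) g5) g6 := by
  split_ifs <;> first | omega | tauto

lemma pvM_eq_scan (cs : List Char) : ∀ k : Nat, pvM cs k = pvScanInt cs (k+1) := by
  intro k
  induction k with
  | zero =>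
    rw [pvM_max]
    have hg0 : ∀ sub : List Char, PySem.Chars.rfind.go cs sub 0 =
        if sub.isPrefixOf (cs.drop 0) = true then (0:Int) else -1 := fun _ => rfl
    simp only [hg0]
    have hRHS : pvScanInt cs 1 = if pvBdry cs 0 then (0:Int) else -1 := by
      simp only [pvScanInt, pvRevScan]; split_ifs <;> rfl
    rw [hRHS, pvBdry_eq]
    simp only [Bool.or_eq_true]
    split_ifs <;> first | omega | tauto
  | succ k ih =>
    have hg : ∀ sub : List Char, PySem.Chars.rfind.go cs sub (k+1) =
        if sub.isPrefixOf (cs.drop (k+1)) = true then ((k:Int)+1) else PySem.Chars.rfind.go cs sub k := by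
      intro sub
      show (if sub.isPrefixOf (cs.drop (k+1)) then ((k+1 : Nat) : Int) else PySem.Chars.rfind.go cs sub k) = _
      push_cast
      rfl
    have hRHS : pvScanInt cs (k+1+1) = if pvBdry cs (k+1) then ((k:Int)+1) else pvScanInt cs (k+1) := by
      simp only [pvScanInt, pvRevScan]
      split_ifs <;> push_cast <;> rfl
    rw [pvM_max]
    simp only [hg]
    rw [pvMaxStep ((k:Int)) _ _ _ _ _ _ _ _ _ _ _ _ (by omega)
      (pvGo_le cs _ k) (pvGo_le cs _ k) (pvGo_le cs _ k) (pvGo_le cs _ k) (pvGo_le cs _ k) (pvGo_le cs _ k)]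
    rw [hRHS, ← ih, pvM_max, pvBdry_eq]
    simp only [Bool.or_eq_true]
    exact if_congr (by tauto) rfl rfl

lemma pvBdry_false_of_ge (cs : List Char) (i : Nat) (h : cs.length ≤ i + 1) : pvBdry cs i = false := by
  have : cs[i+1]? = none := by
    rw [List.getElem?_eq_none_iff]; omega
  simp [pvBdry, this]

lemma pvM_eq_final (cs : List Char) : pvM cs cs.length = pvScanInt cs (cs.length - 1) := by
  rw [pvM_eq_scan]
  rcases hn : cs.length with _ | n
  · have h0 := pvBdry_false_of_ge cs 0 (by omega)
    simp [pvScanInt, pvRevScan, h0]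
  · have hA := pvBdry_false_of_ge cs (n+1) (by omega)
    have hB := pvBdry_false_of_ge cs n (by omega)
    simp [pvScanInt, pvRevScan, hA, hB]

-- ===== VERDICT (by name: the statement is the Claim_ definition above) =====
theorem extract_last_sentence_spec : Claim_equal_extract_last_sentence := by
  intro text _
  unfold Spec_extract_last_sentence extract_last_sentence extract_last_sentence_alt
  split_ifs with hempty
  · rfl
  · set t := PySem.Str.strip text with ht
    have hfold :
        ([". ", "! ", "? ", ".\n", "!\n", "?\n"] : List String).foldl
          (fun lb e =>
            let pos := PySem.Str.rfind t e
            if pos > lb then pos else lb) (-1) = pvM t.toList t.toList.length := by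
      simp only [pvM, List.foldl, PySem.Str.rfind_eq, PySem.Chars.rfind]
      rfl
    simp only [hfold, pvM_eq_final]
    rcases hscan : pvRevScan t.toList (t.toList.length - 1) with _ | i
    · simp only [pvScanInt, hscan]
      simp
    · simp only [pvScanInt, hscan]
      have hne : ((i : Int) ≠ -1) := by omega
      simp only [if_pos hne]
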